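-- pv_equiv track=rewrite | github.com/Styfjion/code | toutiao5.py | maxTime
-- ===== SOURCE A (Python) =====
-- def maxTime(number,timeList):
--     timeList = [int(unit) for unit in timeList]
--     timeList.sort(reverse=True)
--     count = 0
--     chengke = timeList[:-2]
--     yufu = timeList[-2:]
--     while chengke:
--         count += chengke.pop(0)
--         count += yufu[0]
--     return count
-- ===== SOURCE B (Python) =====
-- def maxTime(number, timeList):
--     total = 0
--     n = 0
--     m1 = None  # smallest so far
--     m2 = None  # second smallest so far
--     for unit in timeList:
--         v = int(unit)
--         total += v
--         n += 1
--         if m1 is None or v < m1: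
--             m1, m2 = v, m1
--         elif m2 is None or v < m2:
--             m2 = v
--     if n < 3:
--         return 0
--     return total - m1 - m2 + (n - 2) * m2
-- ===== Notes on version B (the rewrite author's own statement) =====
-- stated objective: faster
-- what changed: Replaced A's descending sort plus front-pop accumulation loop by a single linear pass that tracks the running sum, the count and the two smallest values, combined by the closed form total - min1 - min2 + (n-2)*min2.
import Mathlib
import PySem

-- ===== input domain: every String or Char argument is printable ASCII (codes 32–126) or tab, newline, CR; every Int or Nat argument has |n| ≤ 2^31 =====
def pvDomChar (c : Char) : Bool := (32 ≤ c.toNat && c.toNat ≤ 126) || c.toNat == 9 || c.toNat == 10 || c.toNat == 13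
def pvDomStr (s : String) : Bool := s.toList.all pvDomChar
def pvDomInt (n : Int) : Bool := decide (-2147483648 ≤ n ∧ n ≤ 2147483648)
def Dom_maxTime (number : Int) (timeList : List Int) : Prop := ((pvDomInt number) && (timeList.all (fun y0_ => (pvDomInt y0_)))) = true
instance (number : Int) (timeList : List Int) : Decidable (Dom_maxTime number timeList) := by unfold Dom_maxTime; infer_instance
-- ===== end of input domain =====

-- B replaces A's descending sort + pop(0) loop by one linear min/sum scan and a closed form (objective: faster).

-- ===== PORT A =====
def maxTime (number : Int) (timeList : List Int) : Int :=
  -- timeList = [int(unit) for unit in timeList]  (identity on ints)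
  let tl := timeList.map (fun unit => unit)
  -- timeList.sort(reverse=True)
  let s := PySem.List.sorted tl (fun x => x) true
  let chengke := PySem.List.slice s none (some (-2))   -- timeList[:-2]
  let yufu := PySem.List.slice s (some (-2)) none      -- timeList[-2:]
  -- while chengke: count += chengke.pop(0); count += yufu[0]
  -- yufu[0] is in range whenever the loop body runs (chengke ≠ [] ⇒ s has ≥ 3 elements), so the default 0 is unreachable
  chengke.foldl (fun count x => count + x + PySem.List.pyGetD yufu 0 0) 0

-- ===== PORT B =====
-- state = (total, n, m1, m2): running sum, count, smallest-so-far, second-smallest-so-far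
def pvBStep (st : Int × Int × Option Int × Option Int) (v : Int) :
    Int × Int × Option Int × Option Int :=
  let total := st.1 + v
  let n := st.2.1 + 1
  match st.2.2.1, st.2.2.2 with
  | none, m2 => (total, n, some v, m2)                     -- m1 is None: m1, m2 = v, m1
  | some a, m2 =>
    if v < a then (total, n, some v, some a)               -- v < m1: m1, m2 = v, m1
    else
      match m2 with
      | none => (total, n, some a, some v)                 -- m2 is None: m2 = v
      | some b =>
        if v < b then (total, n, some a, some v)           -- v < m2: m2 = v
        else (total, n, some a, some b)

def maxTime_alt (number : Int) (timeList : List Int) : Int :=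
  let st := timeList.foldl pvBStep (0, 0, none, none)
  if st.2.1 < 3 then 0
  else
    -- m1 and m2 are always set ints here (n ≥ 3), so the .getD 0 defaults are unreachable
    st.1 - st.2.2.1.getD 0 - st.2.2.2.getD 0 + (st.2.1 - 2) * st.2.2.2.getD 0

-- ===== PRECONDITION & SPEC =====
def Spec_maxTime (number : Int) (timeList : List Int) (out : Int) : Prop := out = maxTime_alt number timeList
instance (number : Int) (timeList : List Int) (out : Int) : Decidable (Spec_maxTime number timeList out) := by unfold Spec_maxTime; infer_instance

-- ===== CLAIM (what is proved, stated in full; the proofs are below) =====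
def Claim_equal_maxTime : Prop := ∀ (number : Int) (timeList : List Int), Dom_maxTime number timeList → Spec_maxTime number timeList (maxTime number timeList)

-- ===== LEMMAS AND PROOFS =====

/-- `a` is a minimum value of `l`. -/
def pvIsMin (l : List Int) (a : Int) : Prop := a ∈ l ∧ ∀ x ∈ l, a ≤ x

/-- Invariant of B's scan after processing `l`. -/
def pvInv (l : List Int) (st : Int × Int × Option Int × Option Int) : Prop :=
  st.1 = l.sum ∧ st.2.1 = (l.length : Int) ∧
  (match st.2.2.1, st.2.2.2 with
   | none, none => l = []
   | some a, none => l = [a]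
   | some a, some b => 2 ≤ l.length ∧ pvIsMin l a ∧ pvIsMin (l.erase a) b
   | none, some _ => False)

theorem pvInv_step (l : List Int) (st : Int × Int × Option Int × Option Int) (v : Int)
    (h : pvInv l st) : pvInv (l ++ [v]) (pvBStep st v) := by
  obtain ⟨t, n, m1, m2⟩ := st
  obtain ⟨hsum, hlen, hshape⟩ := h
  simp only at hsum hlen hshape
  match m1, m2 with
  | none, none =>
    subst hshape
    have hstep : pvBStep (t, n, none, none) v = (t + v, n + 1, some v, none) := by
      simp [pvBStep]
    rw [hstep]
    refine ⟨by simp at hsum ⊢; omega, by simp at hlen ⊢; omega, by simp⟩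
  | none, some b => exact absurd hshape (by simp)
  | some a, none =>
    subst hshape
    by_cases hv : v < a
    · have hstep : pvBStep (t, n, some a, none) v = (t + v, n + 1, some v, some a) := by
        simp [pvBStep, hv]
      rw [hstep]
      refine ⟨by simp at hsum ⊢; omega, by simp at hlen ⊢; omega, by simp, ?_, ?_⟩
      · exact ⟨by simp, by intro x hx; simp at hx; omega⟩
      · have he : ([a] ++ [v]).erase v = [a] := by
          simp [show (a == v) = false by simp; omega]
        rw [he]
        exact ⟨by simp, by intro x hx; simp at hx; omega⟩
    · have hstep : pvBStep (t, n, some a, none) v = (t + v, n + 1, some a, some v) := by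
        simp [pvBStep, hv]
      rw [hstep]
      refine ⟨by simp at hsum ⊢; omega, by simp at hlen ⊢; omega, by simp, ?_, ?_⟩
      · exact ⟨by simp, by intro x hx; simp at hx; omega⟩
      · have he : ([a] ++ [v]).erase a = [v] := by
          simp
        rw [he]
        exact ⟨by simp, by intro x hx; simp at hx; omega⟩
  | some a, some b =>
    obtain ⟨hl2, ⟨haMem, haMin⟩, hbMem, hbMin⟩ := hshape
    by_cases hv : v < a
    · -- new pair (v, a); v ∉ l, so (l ++ [v]).erase v = l ++ []
      have hvnot : v ∉ l := fun hc => absurd (haMin v hc) (by omega)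
      have hstep : pvBStep (t, n, some a, some b) v = (t + v, n + 1, some v, some a) := by
        simp [pvBStep, hv]
      rw [hstep]
      refine ⟨by simp at hsum ⊢; omega, by simp at hlen ⊢; omega, by simp; omega, ?_, ?_⟩
      · refine ⟨by simp, ?_⟩
        intro x hx
        rcases List.mem_append.mp hx with hx | hx
        · exact le_of_lt (lt_of_lt_of_le hv (haMin x hx))
        · simp at hx; omega
      · rw [List.erase_append_right _ hvnot]
        simp only [List.erase_cons_head, List.append_nil]
        exact ⟨haMem, haMin⟩
    · -- a stays the minimum; the second minimum becomes v or stays b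
      have hmin' : pvIsMin (l ++ [v]) a := by
        refine ⟨List.mem_append_left _ haMem, ?_⟩
        intro x hx
        rcases List.mem_append.mp hx with hx | hx
        · exact haMin x hx
        · simp at hx; omega
      have herase : (l ++ [v]).erase a = l.erase a ++ [v] :=
        List.erase_append_left _ haMem
      by_cases hvb : v < b
      · have hstep : pvBStep (t, n, some a, some b) v = (t + v, n + 1, some a, some v) := by
          simp [pvBStep, hv, hvb]
        rw [hstep]
        refine ⟨by simp at hsum ⊢; omega, by simp at hlen ⊢; omega, by simp; omega, hmin', ?_⟩
        rw [herase]
        refine ⟨List.mem_append_right _ (by simp), ?_⟩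
        intro x hx
        rcases List.mem_append.mp hx with hx | hx
        · exact le_of_lt (lt_of_lt_of_le hvb (hbMin x hx))
        · simp at hx; omega
      · have hstep : pvBStep (t, n, some a, some b) v = (t + v, n + 1, some a, some b) := by
          simp [pvBStep, hv, hvb]
        rw [hstep]
        refine ⟨by simp at hsum ⊢; omega, by simp at hlen ⊢; omega, by simp; omega, hmin', ?_⟩
        rw [herase]
        refine ⟨List.mem_append_left _ hbMem, ?_⟩
        intro x hx
        rcases List.mem_append.mp hx with hx | hx
        · exact hbMin x hx
        · simp at hx; omega

theorem pvInv_scan (l : List Int) : pvInv l (l.foldl pvBStep (0, 0, none, none)) := by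
  induction l using List.reverseRecOn with
  | nil => simp [pvInv]
  | append_singleton l v ih =>
    rw [List.foldl_append]
    exact pvInv_step l _ v ih

/-- A's accumulation loop in closed form. -/
theorem pvALoop (xs : List Int) (y c0 : Int) :
    xs.foldl (fun count x => count + x + y) c0 = c0 + xs.sum + xs.length * y := by
  induction xs generalizing c0 with
  | nil => simp
  | cons x xs ih =>
    simp only [List.foldl_cons, ih, List.sum_cons, List.length_cons]
    push_cast; ring

theorem pvMain (number : Int) (l : List Int) : maxTime number l = maxTime_alt number l := by
  have hscan := pvInv_scan l
  simp only [maxTime, maxTime_alt, List.map_id_fun', id]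
  set st := l.foldl pvBStep (0, 0, (none : Option Int), (none : Option Int)) with hst
  obtain ⟨hsum, hlen, hshape⟩ := hscan
  set s := PySem.List.sorted l (fun x => x) true with hsdef
  have hperm : s.Perm l := PySem.List.sorted_perm l (fun x => x) true
  have hslen : s.length = l.length := PySem.List.length_sorted l (fun x => x) true
  have hpair : List.Pairwise (fun a b => b ≤ a) s := PySem.List.sorted_pairwise_rev l (fun x => x)
  rw [PySem.List.slice_to_neg_ofNat s 2 (by omega), PySem.List.slice_from_neg_ofNat s 2 (by omega)]
  by_cases hN : l.length ≤ 2
  · -- both sides are 0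
    have h0 : s.length - 2 = 0 := by omega
    rw [h0]
    simp only [List.take_zero, List.foldl_nil]
    rw [if_pos (by omega)]
  · -- l has at least 3 elements
    rw [not_le] at hN
    -- B's state has the shape (sum, len, some a, some b)
    obtain ⟨a, b, hm1, hm2, hl2, ⟨haMem, haMin⟩, hbMem, hbMin⟩ :
        ∃ a b, st.2.2.1 = some a ∧ st.2.2.2 = some b ∧ 2 ≤ l.length ∧
          pvIsMin l a ∧ b ∈ l.erase a ∧ ∀ x ∈ l.erase a, b ≤ x := by
      rcases hm1 : st.2.2.1 with _ | a <;> rcases hm2 : st.2.2.2 with _ | b <;>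
        rw [hm1, hm2] at hshape
      · simp only [hshape] at hN; simp at hN
      · exact absurd hshape (by simp)
      · rw [hshape] at hN; simp at hN
      · exact ⟨a, b, rfl, rfl, hshape.1, hshape.2.1, hshape.2.2.1, hshape.2.2.2⟩
    -- decompose the descending sorted list as u ++ [p, q]
    have hts : s.take (s.length - 2) ++ s.drop (s.length - 2) = s := List.take_append_drop _ _
    have hdlen : (s.drop (s.length - 2)).length = 2 := by
      rw [List.length_drop]; omega
    obtain ⟨p, q, hd⟩ : ∃ p q, s.drop (s.length - 2) = [p, q] := by
      rcases hdd : s.drop (s.length - 2) with _ | ⟨p, _ | ⟨q, _ | _⟩⟩ <;>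
        rw [hdd] at hdlen <;> simp at hdlen
      exact ⟨p, q, rfl⟩
    set u := s.take (s.length - 2) with hu
    rw [hd] at hts
    rw [hd, PySem.List.pyGetD_zero_cons]
    rw [pvALoop]
    have hulen : u.length = l.length - 2 := by
      rw [hu, List.length_take]; omega
    -- order facts from Pairwise on u ++ [p, q]
    rw [← hts] at hpair
    rw [List.pairwise_append] at hpair
    obtain ⟨-, hpq, hcross⟩ := hpair
    have hqp : q ≤ p := by
      have := (List.pairwise_cons.mp hpq).1 q (by simp)
      simpa using this
    have hqlow : ∀ x ∈ s, q ≤ x := by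
      intro x hx
      rw [← hts] at hx
      rcases List.mem_append.mp hx with hx | hx
      · exact le_trans hqp ((hcross x hx p (by simp)))
      · simp at hx; rcases hx with rfl | rfl
        · exact hqp
        · exact le_refl _
    have hplow : ∀ x ∈ u ++ [p], p ≤ x := by
      intro x hx
      rcases List.mem_append.mp hx with hx | hx
      · exact hcross x hx p (by simp)
      · simp at hx; omega
    -- q is the minimum, so q = a
    have hqa : q = a := by
      have h1 : q ≤ a := hqlow a (hperm.mem_iff.mpr haMem)
      have h2 : a ≤ q := haMin q (hperm.mem_iff.mp (by rw [← hts]; simp))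
      omega
    -- s.erase a is a permutation of u ++ [p], so p = b
    have hsperm : (s.erase a).Perm (u ++ [p]) := by
      have hamem : a ∈ s := by rw [← hts]; simp [hqa.symm]
      have h2 : s.Perm (a :: s.erase a) := List.perm_cons_erase hamem
      have h1 : s.Perm (a :: (u ++ [p])) := by
        rw [← hts, hqa]
        have he : u ++ [p, a] = (u ++ [p]) ++ [a] := by simp
        rw [he]
        simpa using (List.perm_append_comm (l₁ := u ++ [p]) (l₂ := [a]))
      exact (h2.symm.trans h1).cons_inv
    have hlperm : (l.erase a).Perm (u ++ [p]) := ((hperm.erase a).symm).trans hsperm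
    have hpb : p = b := by
      have h1 : p ≤ b := hplow b (hlperm.mem_iff.mp hbMem)
      have h2 : b ≤ p := hbMin p (hlperm.mem_iff.mpr (by simp))
      omega
    -- sums
    have hssum : s.sum = l.sum := hperm.sum_eq
    have husum : u.sum = l.sum - p - q := by
      have : u.sum + (p + q) = s.sum := by
        rw [← hts]; simp [List.sum_append]
      omega
    rw [if_neg (by omega)]
    rw [hm1, hm2]
    simp only [Option.getD_some]
    rw [husum, hulen, hsum, hlen, hqa, hpb]
    have hcast : ((l.length - 2 : Nat) : Int) = (l.length : Int) - 2 := by omega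
    rw [hcast]
    ring

-- ===== VERDICT (by name: the statement is the Claim_ definition above) =====
theorem maxTime_spec : Claim_equal_maxTime := by
  intro number timeList _
  unfold Spec_maxTime
  exact pvMain number timeList
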